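-- pv_equiv track=rewrite | github.com/ifs55/Desafio-EDS | Q9.py | verifica_prescricao
-- ===== SOURCE A (Python) =====
-- def verifica_prescricao(prescricao, estoque):
--     # Cria um dicionário com a contagem dos medicamentos na prescrição
--     dict_prescricao = {}
--     for medicamento in prescricao:
--         dict_prescricao[medicamento] = dict_prescricao.get(medicamento, 0) + 1
--
--     # Verifica se os medicamentos na prescrição estão disponíveis no estoque
--     for medicamento in dict_prescricao:
--         if medicamento not in estoque or dict_prescricao[medicamento] > estoque.count(medicamento):
--             return False
--
--     return True
-- ===== SOURCE B (Python) =====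
-- def verifica_prescricao(prescricao, estoque):
--     # Greedily consume a copy of the stock, one prescribed item at a time.
--     restante = list(estoque)
--     for med in prescricao:
--         if med in restante:
--             restante.remove(med)
--         else:
--             return False
--     return True
-- ===== Notes on version B (the rewrite author's own statement) =====
-- stated objective: alternative
-- what changed: Replaces A's two-phase count-then-compare (build a count dict over the prescription, then for each distinct med compare with estoque.count) by a single greedy pass that consumes one occurrence from a copied stock per prescribed item, failing on the first item that cannot be consumed.
import Mathlib
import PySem

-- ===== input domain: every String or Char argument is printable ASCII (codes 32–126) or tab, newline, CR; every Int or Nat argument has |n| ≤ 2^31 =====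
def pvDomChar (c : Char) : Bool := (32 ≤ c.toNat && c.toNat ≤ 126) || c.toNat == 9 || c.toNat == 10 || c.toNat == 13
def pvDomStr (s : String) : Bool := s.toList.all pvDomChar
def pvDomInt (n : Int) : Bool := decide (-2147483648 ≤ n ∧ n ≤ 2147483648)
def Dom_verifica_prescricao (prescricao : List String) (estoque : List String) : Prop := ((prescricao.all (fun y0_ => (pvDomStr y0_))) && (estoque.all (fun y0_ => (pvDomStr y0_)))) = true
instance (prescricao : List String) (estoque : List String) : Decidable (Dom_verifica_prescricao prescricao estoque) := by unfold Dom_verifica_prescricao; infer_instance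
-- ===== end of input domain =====

-- B replaces A's count-dict-then-compare by greedy one-by-one consumption of a copied stock (alternative decomposition, same cost).


-- ===== PORT A =====
-- 'for medicamento in dict_prescricao: if … return False' / final 'return True'
-- (d[medicamento] is always present here, so it is Dict.getD … 0 exactly)
def verificaLoopA (d : PySem.Dict String Int) (estoque : List String) : List String → Bool
  | [] => true
  | med :: rest =>
      if !(estoque.contains med) || d.getD med 0 > (PySem.List.count estoque med : Int) then false
      else verificaLoopA d estoque rest

def verifica_prescricao (prescricao : List String) (estoque : List String) : Bool :=
  let dict_prescricao :=
    prescricao.foldl (fun d medicamento => d.insert medicamento (d.getD medicamento 0 + 1)) PySem.Dict.empty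
  verificaLoopA dict_prescricao estoque dict_prescricao.keys

-- ===== PORT B =====
-- 'for med in prescricao: remove one occurrence from restante or return False'
def verificaLoopB : List String → List String → Bool
  | [], _ => true
  | med :: rest, restante =>
      match PySem.List.remove? restante med with
      | some restante' => verificaLoopB rest restante'
      | none => false

def verifica_prescricao_alt (prescricao : List String) (estoque : List String) : Bool :=
  verificaLoopB prescricao estoque

-- ===== PRECONDITION & SPEC =====
def Spec_verifica_prescricao (prescricao : List String) (estoque : List String) (out : Bool) : Prop := out = verifica_prescricao_alt prescricao estoque
instance (prescricao : List String) (estoque : List String) (out : Bool) : Decidable (Spec_verifica_prescricao prescricao estoque out) := by unfold Spec_verifica_prescricao; infer_instance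

-- ===== CLAIM (what is proved, stated in full; the proofs are below) =====
def Claim_equal_verifica_prescricao : Prop := ∀ (prescricao : List String) (estoque : List String), Dom_verifica_prescricao prescricao estoque → Spec_verifica_prescricao prescricao estoque (verifica_prescricao prescricao estoque)

-- ===== LEMMAS AND PROOFS =====

-- B's greedy loop succeeds iff every multiplicity in the prescription fits in the remaining stock.
theorem verificaLoopB_eq_true_iff (p r : List String) :
    verificaLoopB p r = true ↔ ∀ m, p.count m ≤ r.count m := by
  induction p generalizing r with
  | nil => simp [verificaLoopB]
  | cons med rest ih =>
      by_cases hmem : med ∈ r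
      · rw [verificaLoopB, PySem.List.remove?_eq_some_erase r med hmem]
        rw [ih]
        have hone : 1 ≤ r.count med := List.one_le_count_iff.mpr hmem
        constructor
        · intro h m
          have hm := h m
          rw [List.count_erase] at hm
          rw [List.count_cons]
          by_cases hx : m = med
          · subst hx; simp only [beq_self_eq_true, if_true] at hm ⊢; omega
          · simp only [beq_iff_eq, Ne.symm hx, if_false] at hm ⊢; omega
        · intro h m
          have hm := h m
          rw [List.count_cons] at hm
          rw [List.count_erase]
          by_cases hx : m = med
          · subst hx; simp only [beq_self_eq_true, if_true] at hm ⊢; omega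
          · simp only [beq_iff_eq, Ne.symm hx, if_false] at hm ⊢; omega
      · rw [verificaLoopB, (PySem.List.remove?_eq_none_iff r med).mpr hmem]
        simp only [Bool.false_eq_true, false_iff, not_forall, not_le]
        exact ⟨med, by
          have : r.count med = 0 := List.count_eq_zero.mpr hmem
          simp [List.count_cons_self, this]⟩

-- A's checking loop over a key list succeeds iff every key passes the availability test.
theorem verificaLoopA_eq_true_iff (d : PySem.Dict String Int) (e : List String) (ks : List String) :
    verificaLoopA d e ks = true ↔
      ∀ m ∈ ks, m ∈ e ∧ d.getD m 0 ≤ (List.count m e : Int) := by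
  induction ks with
  | nil => simp [verificaLoopA]
  | cons k rest ih =>
      rw [verificaLoopA]
      by_cases hc : (!(e.contains k) || d.getD k 0 > (PySem.List.count e k : Int)) = true
      · simp only [hc, if_true, Bool.false_eq_true, false_iff, not_forall]
        refine ⟨k, by simp, ?_⟩
        rcases Bool.or_eq_true_iff.mp hc with h | h
        · intro ⟨h1, _⟩
          rw [Bool.not_eq_true', ← Bool.not_eq_true] at h
          exact h (List.contains_iff_mem.mpr h1)
        · intro ⟨_, h2⟩
          rw [PySem.List.count_eq] at h
          simp only [decide_eq_true_eq] at h
          omega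
      · simp only [hc, Bool.false_eq_true, if_false]
        rw [ih]
        simp only [Bool.or_eq_true, not_or, Bool.not_eq_true', Bool.not_eq_true] at hc
        constructor
        · intro h m hm
          rcases List.mem_cons.mp hm with rfl | hm'
          · refine ⟨List.contains_iff_mem.mp (by simpa using hc.1), ?_⟩
            have h2 : ¬ d.getD m 0 > ((List.count m e : Nat) : Int) := by
              have h3 := hc.2
              rw [PySem.List.count_eq] at h3
              simpa using h3
            omega
          · exact h m hm'
        · intro h m hm; exact h m (List.mem_cons_of_mem _ hm)

-- A equals the multiset-fit condition.
theorem verifica_eq_true_iff (p e : List String) :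
    verifica_prescricao p e = true ↔ ∀ m, p.count m ≤ e.count m := by
  simp only [verifica_prescricao, PySem.Dict.foldl_insert_getD_add_one_eq_counter,
    PySem.Dict.keys_counter, verificaLoopA_eq_true_iff]
  constructor
  · intro h m
    by_cases hm : m ∈ p
    · have := (h m ((PySem.Set.mem_ofList p m).mpr hm)).2
      rw [PySem.Dict.getD_counter] at this
      exact_mod_cast this
    · simp [List.count_eq_zero.mpr hm]
  · intro h m hm
    have hm' : m ∈ p := (PySem.Set.mem_ofList p m).mp hm
    have hcnt : 1 ≤ e.count m := le_trans (List.one_le_count_iff.mpr hm') (h m)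
    refine ⟨List.one_le_count_iff.mp hcnt, ?_⟩
    rw [PySem.Dict.getD_counter]
    exact_mod_cast h m

-- ===== VERDICT (by name: the statement is the Claim_ definition above) =====
theorem verifica_prescricao_spec : Claim_equal_verifica_prescricao := by
  intro p e _
  show verifica_prescricao p e = verifica_prescricao_alt p e
  rw [Bool.eq_iff_iff, verifica_eq_true_iff]
  exact Iff.symm (verificaLoopB_eq_true_iff p e)
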